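-- pv_equiv track=rewrite | github.com/companje/Sanyo-MBC-550-555-experiments | Beeper2/play.py | parse_note_string
-- ===== SOURCE A (Python) =====
-- def parse_note_string(s, default_octave=4):
--     blocks = s.strip().split()
--     all_notes = []
--     for block in blocks:
--         i = 0
--         while i < len(block):
--             ch = block[i].lower()
--             if ch < 'a' or ch > 'g':
--                 i += 1
--                 continue
--             if i + 1 < len(block) and block[i + 1] == '#':
--                 note = ch.upper() + '#'
--                 i += 1
--             else:
--                 note = ch.upper()
--             i += 1
--             octave = default_octave
--             if i < len(block) and block[i].isdigit():
--                 octave = int(block[i])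
--                 i += 1
--             all_notes.append(f"{note}{octave}")
--     return all_notes
-- ===== SOURCE B (Python) =====
-- def parse_note_string(s, default_octave=4):
--     # One-pass state machine over the string: no strip/split, no index arithmetic.
--     notes = []
--     pending = None      # upper-cased note (possibly already carrying '#') awaiting its octave digit
--     can_sharp = False   # a '#' may still attach to the pending note
--     for c in s:
--         if pending is not None:
--             if can_sharp and c == '#':
--                 pending += '#'
--                 can_sharp = False
--                 continue
--             if '0' <= c <= '9':
--                 notes.append(pending + c)
--                 pending = None
--                 continue
--             notes.append(pending + str(default_octave))
--             pending = None
--         if 'a' <= c.lower() <= 'g':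
--             pending = c.upper()
--             can_sharp = True
--     if pending is not None:
--         notes.append(pending + str(default_octave))
--     return notes
-- ===== Notes on version B (the rewrite author's own statement) =====
-- stated objective: simpler
-- what changed: A strips the string, splits it into whitespace blocks and scans each block with an index-based while loop with lookahead; B makes a single pass over the raw string with a three-state machine (no pending note / pending note that may take '#' / pending note past '#') and no split or index arithmetic.
import Mathlib
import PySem

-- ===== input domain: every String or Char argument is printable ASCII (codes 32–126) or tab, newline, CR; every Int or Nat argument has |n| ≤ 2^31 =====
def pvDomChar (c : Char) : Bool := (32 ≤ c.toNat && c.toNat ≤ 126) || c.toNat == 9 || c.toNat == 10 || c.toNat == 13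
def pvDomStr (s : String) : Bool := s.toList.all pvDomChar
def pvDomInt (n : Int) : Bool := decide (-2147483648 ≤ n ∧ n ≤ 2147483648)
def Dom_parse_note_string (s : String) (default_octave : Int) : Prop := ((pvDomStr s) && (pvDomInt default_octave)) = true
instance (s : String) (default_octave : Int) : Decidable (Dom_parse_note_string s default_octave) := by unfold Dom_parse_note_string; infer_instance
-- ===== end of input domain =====

-- B replaces A's strip/split plus index-scanning while-loop by a single one-pass state machine
-- over the string (objective: simpler; same return value, no side effects in either version).

-- ===== PORT A =====
-- the inner while loop of A: index i over the characters of one block;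
-- pnsOctave is the tail of the loop body (the octave lookup shared by both note shapes)
mutual
def pnsLoop (bl : List Char) (d : Int) (i : Nat) (acc : List String) : List String :=
  if h : i < bl.length then
    if PySem.Chars.lowerChar bl[i] < 'a' ∨ 'g' < PySem.Chars.lowerChar bl[i] then
      pnsLoop bl d (i+1) acc
    else
      if i+1 < bl.length ∧ bl[i+1]? = some '#' then
        pnsOctave bl d (i+2)
          (String.ofList [PySem.Chars.upperChar (PySem.Chars.lowerChar bl[i])] ++ "#") acc
      else
        pnsOctave bl d (i+1)
          (String.ofList [PySem.Chars.upperChar (PySem.Chars.lowerChar bl[i])]) acc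
  else acc
  termination_by (bl.length - i, 0)
  decreasing_by all_goals (simp [Prod.lex_iff]; try omega)

def pnsOctave (bl : List Char) (d : Int) (i : Nat) (note : String) (acc : List String) :
    List String :=
  match bl[i]? with
  | some c2 =>
    if PySem.Chars.isdigit c2 then
      -- int(block[i]) on a decimal digit is its value; exact on the ASCII domain
      pnsLoop bl d (i+1) (acc ++ [note ++ PySem.Int.toStr ((c2.toNat : Int) - 48)])
    else
      pnsLoop bl d i (acc ++ [note ++ PySem.Int.toStr d])
  | none => pnsLoop bl d i (acc ++ [note ++ PySem.Int.toStr d])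
  termination_by (bl.length - i, 1)
  decreasing_by all_goals (simp [Prod.lex_iff]; try omega)
end

def parse_note_string (s : String) (default_octave : Int) : List String :=
  let blocks := PySem.Str.split₀ (PySem.Str.strip s)
  blocks.foldl (fun acc block => pnsLoop block.toList default_octave 0 acc) []

-- ===== PORT B =====
-- one step of B's state machine: (emitted notes, pending note, may a '#' still attach)
def pnsAltStep (d : Int) (st : List String × Option String × Bool) (c : Char) :
    List String × Option String × Bool :=
  let (notes, pending, can_sharp) := st
  match pending with
  | some p =>
    if can_sharp && (c == '#') then (notes, some (p ++ "#"), false)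
    else if PySem.Chars.isdigit c then (notes ++ [p ++ String.ofList [c]], none, can_sharp)
    else
      let notes' := notes ++ [p ++ PySem.Int.toStr d]
      if 'a' ≤ PySem.Chars.lowerChar c ∧ PySem.Chars.lowerChar c ≤ 'g' then
        (notes', some (String.ofList [PySem.Chars.upperChar c]), true)
      else (notes', none, can_sharp)
  | none =>
      if 'a' ≤ PySem.Chars.lowerChar c ∧ PySem.Chars.lowerChar c ≤ 'g' then
        (notes, some (String.ofList [PySem.Chars.upperChar c]), true)
      else (notes, none, can_sharp)

def parse_note_string_alt (s : String) (default_octave : Int) : List String :=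
  let st := s.toList.foldl (pnsAltStep default_octave) ([], none, false)
  match st.2.1 with
  | some p => st.1 ++ [p ++ PySem.Int.toStr default_octave]
  | none => st.1

-- ===== PRECONDITION & SPEC =====
def Spec_parse_note_string (s : String) (default_octave : Int) (out : List String) : Prop := out = parse_note_string_alt s default_octave
instance (s : String) (default_octave : Int) (out : List String) : Decidable (Spec_parse_note_string s default_octave out) := by unfold Spec_parse_note_string; infer_instance

-- ===== CLAIM (what is proved, stated in full; the proofs are below) =====
def Claim_equal_parse_note_string : Prop := ∀ (s : String) (default_octave : Int), Dom_parse_note_string s default_octave → Spec_parse_note_string s default_octave (parse_note_string s default_octave)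

-- ===== LEMMAS AND PROOFS =====

theorem pns_le_toNat {a b : Char} : (a ≤ b) ↔ a.toNat ≤ b.toNat := Iff.rfl

theorem pns_note_toNat {c : Char}
    (h : 'a' ≤ PySem.Chars.lowerChar c ∧ PySem.Chars.lowerChar c ≤ 'g') :
    (65 ≤ c.toNat ∧ c.toNat ≤ 71) ∨ (97 ≤ c.toNat ∧ c.toNat ≤ 103) := by
  obtain ⟨h1, h2⟩ := h
  rw [pns_le_toNat] at h1 h2
  unfold PySem.Chars.lowerChar PySem.Chars.isupper at h1 h2
  split_ifs at h1 h2 with hu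
  · simp only [Bool.and_eq_true, decide_eq_true_eq, pns_le_toNat] at hu
    have ha : ('A' : Char).toNat = 65 := rfl
    have hz : ('Z' : Char).toNat = 90 := rfl
    have hv : (Char.ofNat (c.toNat + 32)).toNat = c.toNat + 32 := by
      rw [Char.toNat_ofNat, if_pos]
      left; omega
    rw [hv] at h1 h2
    have h97 : ('a' : Char).toNat = 97 := rfl
    have h103 : ('g' : Char).toNat = 103 := rfl
    rw [ha, hz] at hu; rw [h97] at h1; rw [h103] at h2
    left; omega
  · have h97 : ('a' : Char).toNat = 97 := rfl
    have h103 : ('g' : Char).toNat = 103 := rfl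
    rw [h97] at h1; rw [h103] at h2
    right; exact ⟨h1, h2⟩

theorem pns_digit_toStr {c : Char} (h : PySem.Chars.isdigit c = true) :
    PySem.Int.toStr ((c.toNat : Int) - 48) = String.ofList [c] := by
  simp only [PySem.Chars.isdigit, Bool.and_eq_true, decide_eq_true_eq, pns_le_toNat] at h
  have h0 : ('0' : Char).toNat = 48 := rfl
  have h9 : ('9' : Char).toNat = 57 := rfl
  rw [h0] at h; rw [h9] at h
  have e := Char.ofNat_toNat c
  have : c.toNat = 48 ∨ c.toNat = 49 ∨ c.toNat = 50 ∨ c.toNat = 51 ∨ c.toNat = 52 ∨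
      c.toNat = 53 ∨ c.toNat = 54 ∨ c.toNat = 55 ∨ c.toNat = 56 ∨ c.toNat = 57 := by omega
  rcases this with h'|h'|h'|h'|h'|h'|h'|h'|h'|h' <;> (rw [h'] at e ⊢; rw [← e]; decide)

theorem pns_upper_lower {c : Char}
    (h : 'a' ≤ PySem.Chars.lowerChar c ∧ PySem.Chars.lowerChar c ≤ 'g') :
    PySem.Chars.upperChar (PySem.Chars.lowerChar c) = PySem.Chars.upperChar c := by
  have hb := pns_note_toNat h
  have e := Char.ofNat_toNat c
  have : c.toNat = 65 ∨ c.toNat = 66 ∨ c.toNat = 67 ∨ c.toNat = 68 ∨ c.toNat = 69 ∨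
      c.toNat = 70 ∨ c.toNat = 71 ∨ c.toNat = 97 ∨ c.toNat = 98 ∨ c.toNat = 99 ∨
      c.toNat = 100 ∨ c.toNat = 101 ∨ c.toNat = 102 ∨ c.toNat = 103 := by omega
  rcases this with h'|h'|h'|h'|h'|h'|h'|h'|h'|h'|h'|h'|h'|h' <;> (rw [h'] at e; rw [← e]; decide)

theorem pns_isspace_toNat {c : Char} (h : PySem.Chars.isspace c = true) :
    c.toNat = 32 ∨ (9 ≤ c.toNat ∧ c.toNat ≤ 13) ∨ (28 ≤ c.toNat ∧ c.toNat ≤ 31) ∨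
    c.toNat = 133 ∨ c.toNat = 160 ∨ c.toNat = 5760 ∨ (8192 ≤ c.toNat ∧ c.toNat ≤ 8202) ∨
    c.toNat = 8232 ∨ c.toNat = 8233 ∨ c.toNat = 8239 ∨ c.toNat = 8287 ∨ c.toNat = 12288 := by
  simp only [PySem.Chars.isspace, Bool.or_eq_true, Bool.and_eq_true, decide_eq_true_eq] at h
  tauto

theorem pns_isspace_not_note {c : Char} (h : PySem.Chars.isspace c = true) :
    ¬('a' ≤ PySem.Chars.lowerChar c ∧ PySem.Chars.lowerChar c ≤ 'g') := by
  intro hn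
  have h1 := pns_note_toNat hn
  have h2 := pns_isspace_toNat h
  omega

theorem pns_isspace_ne_hash {c : Char} (h : PySem.Chars.isspace c = true) : c ≠ '#' := by
  intro rfl_h; subst rfl_h; exact absurd h (by decide)

theorem pns_isspace_not_digit {c : Char} (h : PySem.Chars.isspace c = true) :
    PySem.Chars.isdigit c = false := by
  by_contra hb
  have hd : PySem.Chars.isdigit c = true := by
    cases hq : PySem.Chars.isdigit c with
    | true => rfl
    | false => exact absurd hq hb
  simp only [PySem.Chars.isdigit, Bool.and_eq_true, decide_eq_true_eq, pns_le_toNat] at hd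
  have h0 : ('0' : Char).toNat = 48 := rfl
  have h9 : ('9' : Char).toNat = 57 := rfl
  rw [h0] at hd; rw [h9] at hd
  have h2 := pns_isspace_toNat h
  omega

-- the common token scan both ports compute, phrased as a mutual structural recursion
mutual
def pnsScan (d : Int) : List Char → List String
  | [] => []
  | c :: rest =>
    if 'a' ≤ PySem.Chars.lowerChar c ∧ PySem.Chars.lowerChar c ≤ 'g' then
      pnsAfterNote d (String.ofList [PySem.Chars.upperChar c]) rest
    else pnsScan d rest
  termination_by l => (l.length, 0)

def pnsAfterNote (d : Int) (nt : String) : List Char → List String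
  | [] => [nt ++ PySem.Int.toStr d]
  | c :: rest =>
    if c = '#' then pnsAfterSharp d (nt ++ "#") rest
    else if PySem.Chars.isdigit c then (nt ++ String.ofList [c]) :: pnsScan d rest
    else (nt ++ PySem.Int.toStr d) :: pnsScan d (c :: rest)
  termination_by l => (l.length, 1)

def pnsAfterSharp (d : Int) (nt : String) : List Char → List String
  | [] => [nt ++ PySem.Int.toStr d]
  | c :: rest =>
    if PySem.Chars.isdigit c then (nt ++ String.ofList [c]) :: pnsScan d rest
    else (nt ++ PySem.Int.toStr d) :: pnsScan d (c :: rest)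
  termination_by l => (l.length, 1)
end

theorem list_strong_length_ind {p : List Char → Prop}
    (H : ∀ l, (∀ m : List Char, m.length < l.length → p m) → p l) : ∀ l, p l := by
  intro l
  induction hn : l.length using Nat.strong_induction_on generalizing l with
  | _ n ih => exact H l (fun m hm => ih m.length (hn ▸ hm) m rfl)

theorem pnsScan_not_note {d : Int} {c : Char} {l : List Char}
    (h : ¬('a' ≤ PySem.Chars.lowerChar c ∧ PySem.Chars.lowerChar c ≤ 'g')) :
    pnsScan d (c :: l) = pnsScan d l := by
  rw [pnsScan, if_neg h]

theorem pnsScan_ws_append (d : Int) (w : Char) (hw : PySem.Chars.isspace w = true)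
    (rest : List Char) :
    ∀ (b : List Char),
      (pnsScan d (b ++ w :: rest) = pnsScan d b ++ pnsScan d (w :: rest))
      ∧ (∀ nt, pnsAfterNote d nt (b ++ w :: rest) = pnsAfterNote d nt b ++ pnsScan d (w :: rest))
      ∧ (∀ nt, pnsAfterSharp d nt (b ++ w :: rest) = pnsAfterSharp d nt b ++ pnsScan d (w :: rest)) := by
  have hwn := pns_isspace_not_note hw
  have hwh := pns_isspace_ne_hash hw
  have hwd := pns_isspace_not_digit hw
  apply list_strong_length_ind
  intro b ih
  have hscan : pnsScan d (b ++ w :: rest) = pnsScan d b ++ pnsScan d (w :: rest) := by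
    match b with
    | [] =>
      have e0 : pnsScan d ([] : List Char) = [] := by rw [pnsScan]
      rw [List.nil_append, e0, List.nil_append]
    | c :: bs =>
      by_cases hc : 'a' ≤ PySem.Chars.lowerChar c ∧ PySem.Chars.lowerChar c ≤ 'g'
      · rw [List.cons_append, pnsScan, if_pos hc, pnsScan, if_pos hc]
        exact ((ih bs (by simp)).2.1) _
      · rw [List.cons_append, pnsScan_not_note hc, pnsScan_not_note hc]
        exact (ih bs (by simp)).1
  refine ⟨hscan, fun nt => ?_, fun nt => ?_⟩
  · match b with
    | [] =>
      have eN : pnsAfterNote d nt [] = [nt ++ PySem.Int.toStr d] := by rw [pnsAfterNote]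
      rw [List.nil_append, eN, pnsAfterNote, if_neg hwh, if_neg (by simp [hwd]),
        List.singleton_append]
    | c :: bs =>
      by_cases h2 : c = '#'
      · subst h2
        rw [List.cons_append, pnsAfterNote, if_pos rfl, pnsAfterNote, if_pos rfl]
        exact ((ih bs (by simp)).2.2) _
      · by_cases h3 : PySem.Chars.isdigit c = true
        · rw [List.cons_append, pnsAfterNote, if_neg h2, if_pos h3, pnsAfterNote, if_neg h2,
            if_pos h3, (ih bs (by simp)).1, List.cons_append]
        · rw [List.cons_append, pnsAfterNote, if_neg h2, if_neg h3, pnsAfterNote, if_neg h2,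
            if_neg h3, ← List.cons_append, hscan, List.cons_append]
  · match b with
    | [] =>
      have eS : pnsAfterSharp d nt [] = [nt ++ PySem.Int.toStr d] := by rw [pnsAfterSharp]
      rw [List.nil_append, eS, pnsAfterSharp, if_neg (by simp [hwd]), List.singleton_append]
    | c :: bs =>
      by_cases h3 : PySem.Chars.isdigit c = true
      · rw [List.cons_append, pnsAfterSharp, if_pos h3, pnsAfterSharp, if_pos h3,
          (ih bs (by simp)).1, List.cons_append]
      · rw [List.cons_append, pnsAfterSharp, if_neg h3, pnsAfterSharp, if_neg h3,
          ← List.cons_append, hscan, List.cons_append]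

theorem pnsScan_all_ws {d : Int} : ∀ {l : List Char}, (∀ c ∈ l, PySem.Chars.isspace c = true) →
    pnsScan d l = [] := by
  intro l
  induction l with
  | nil => intro _; rw [pnsScan]
  | cons c r ih =>
    intro h
    rw [pnsScan_not_note (pns_isspace_not_note (h c (by simp)))]
    exact ih (fun x hx => h x (by simp [hx]))

theorem pnsScan_append_ws {d : Int} {b ws : List Char}
    (h : ∀ c ∈ ws, PySem.Chars.isspace c = true) :
    pnsScan d (b ++ ws) = pnsScan d b := by
  match ws with
  | [] => rw [List.append_nil]
  | w :: ws' =>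
    rw [(pnsScan_ws_append d w (h w (by simp)) ws' b).1,
      pnsScan_not_note (pns_isspace_not_note (h w (by simp))),
      pnsScan_all_ws (l := ws') (fun x hx => h x (by simp [hx])), List.append_nil]

theorem pnsScan_lstrip (d : Int) : ∀ (l : List Char),
    pnsScan d (List.dropWhile PySem.Chars.isspace l) = pnsScan d l := by
  intro l
  induction l with
  | nil => rfl
  | cons c r ih =>
    by_cases hc : PySem.Chars.isspace c = true
    · rw [List.dropWhile_cons_of_pos hc, ih, pnsScan_not_note (pns_isspace_not_note hc)]
    · rw [List.dropWhile_cons_of_neg (by simp [hc])]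

theorem pnsScan_strip (d : Int) (l : List Char) :
    pnsScan d (PySem.Chars.strip l) = pnsScan d l := by
  unfold PySem.Chars.strip PySem.Chars.rstrip PySem.Chars.lstrip
  have hdecomp : List.dropWhile PySem.Chars.isspace l
      = (List.dropWhile PySem.Chars.isspace (List.dropWhile PySem.Chars.isspace l).reverse).reverse
        ++ (List.takeWhile PySem.Chars.isspace (List.dropWhile PySem.Chars.isspace l).reverse).reverse := by
    conv_lhs => rw [← List.reverse_reverse (List.dropWhile PySem.Chars.isspace l),
      ← List.takeWhile_append_dropWhile (p := PySem.Chars.isspace)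
        (l := (List.dropWhile PySem.Chars.isspace l).reverse)]
    rw [List.reverse_append]
  conv_rhs => rw [← pnsScan_lstrip d l, hdecomp]
  rw [pnsScan_append_ws]
  intro c hc
  exact List.mem_takeWhile_imp (List.mem_reverse.mp hc)

theorem pns_go_flatMap (d : Int) :
    ∀ (s cur : List Char) (acc : List (List Char)),
      (PySem.Chars.split₀.go s cur acc).flatMap (pnsScan d)
        = acc.reverse.flatMap (pnsScan d) ++ pnsScan d (cur.reverse ++ s) := by
  intro s
  induction s with
  | nil =>
    intro cur acc
    rw [PySem.Chars.split₀.go]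
    by_cases hc : cur = []
    · subst hc
      rw [if_pos (by simp), List.append_nil]
      have e0 : pnsScan d ([] : List Char).reverse = [] := by rw [List.reverse_nil, pnsScan]
      rw [e0, List.append_nil]
    · rw [if_neg (by simp [hc]), List.reverse_cons, List.flatMap_append, List.append_nil,
        List.flatMap_cons, List.flatMap_nil, List.append_nil]
  | cons ch rest ih =>
    intro cur acc
    rw [PySem.Chars.split₀.go]
    by_cases hs : PySem.Chars.isspace ch = true
    · rw [if_pos hs]
      by_cases hc : cur = []
      · subst hc
        rw [if_pos (by simp), ih, List.reverse_nil, List.nil_append, List.nil_append,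
          pnsScan_not_note (pns_isspace_not_note hs)]
      · rw [if_neg (by simp [hc]), ih, List.reverse_cons, List.flatMap_append,
          List.flatMap_cons, List.flatMap_nil, List.append_nil,
          (pnsScan_ws_append d ch hs rest cur.reverse).1, List.append_assoc,
          List.reverse_nil, List.nil_append, pnsScan_not_note (pns_isspace_not_note hs)]
    · rw [if_neg hs, ih, List.reverse_cons, List.append_assoc, List.singleton_append]

theorem pns_split_flatMap (d : Int) (l : List Char) :
    (PySem.Chars.split₀ l).flatMap (pnsScan d) = pnsScan d l := by
  rw [PySem.Chars.split₀, pns_go_flatMap, List.reverse_nil, List.flatMap_nil,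
    List.nil_append, List.reverse_nil, List.nil_append]

theorem pnsAfterNote_eq_sharp (d : Int) (nt : String) :
    ∀ {l : List Char}, (∀ c r, l = c :: r → c ≠ '#') →
      pnsAfterNote d nt l = pnsAfterSharp d nt l := by
  intro l hl
  match l with
  | [] => rw [pnsAfterNote, pnsAfterSharp]
  | c :: r => rw [pnsAfterNote, if_neg (hl c r rfl), pnsAfterSharp]

theorem pns_loop_octave (bl : List Char) (d : Int) :
    ∀ n : Nat,
      (∀ i acc, bl.length - i = n → pnsLoop bl d i acc = acc ++ pnsScan d (bl.drop i))
      ∧ (∀ i nt acc, bl.length - i = n →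
          pnsOctave bl d i nt acc = acc ++ pnsAfterSharp d nt (bl.drop i)) := by
  intro n
  induction n using Nat.strong_induction_on with
  | _ n ih =>
    have hloop : ∀ i acc, bl.length - i = n →
        pnsLoop bl d i acc = acc ++ pnsScan d (bl.drop i) := by
      intro i acc hn
      rw [pnsLoop]
      by_cases h : i < bl.length
      · rw [dif_pos h]
        have hdrop : bl.drop i = bl[i] :: bl.drop (i+1) := List.drop_eq_getElem_cons h
        by_cases hc : 'a' ≤ PySem.Chars.lowerChar bl[i] ∧ PySem.Chars.lowerChar bl[i] ≤ 'g'
        · rw [if_neg (by simp only [not_or, not_lt]; exact ⟨hc.1, hc.2⟩)]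
          by_cases hh : i+1 < bl.length ∧ bl[i+1]? = some '#'
          · rw [if_pos hh]
            rw [(ih _ (by omega)).2 (i+2) _ acc rfl]
            rw [hdrop, pnsScan, if_pos hc, pns_upper_lower hc]
            have hd1 : bl.drop (i+1) = bl[i+1] :: bl.drop (i+2) :=
              List.drop_eq_getElem_cons hh.1
            obtain ⟨hlt1, hsharp⟩ := List.getElem?_eq_some_iff.mp hh.2
            rw [hd1, hsharp, pnsAfterNote, if_pos rfl]
          · rw [if_neg hh]
            rw [(ih _ (by omega)).2 (i+1) _ acc rfl]
            rw [hdrop, pnsScan, if_pos hc, pns_upper_lower hc]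
            rw [pnsAfterNote_eq_sharp]
            intro c r hcr hce
            subst hce
            apply hh
            cases hd1 : bl[i+1]? with
            | none =>
              rw [List.drop_eq_nil_of_le (List.getElem?_eq_none_iff.mp hd1)] at hcr
              cases hcr
            | some c2 =>
              obtain ⟨hlt, hge⟩ := List.getElem?_eq_some_iff.mp hd1
              rw [List.drop_eq_getElem_cons hlt, hge] at hcr
              cases hcr
              exact ⟨hlt, rfl⟩
        · rw [if_pos (by by_contra hno; simp only [not_or, not_lt] at hno; exact hc hno)]
          rw [(ih _ (by omega)).1 (i+1) acc rfl, hdrop, pnsScan_not_note hc]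
      · rw [dif_neg h]
        have e0 : pnsScan d (bl.drop i) = [] := by
          rw [List.drop_eq_nil_of_le (le_of_not_gt h), pnsScan]
        rw [e0, List.append_nil]
    refine ⟨hloop, ?_⟩
    intro i nt acc hn
    rw [pnsOctave]
    split
    next c2 heq =>
      obtain ⟨hlt, hge⟩ := List.getElem?_eq_some_iff.mp heq
      have hdrop : bl.drop i = c2 :: bl.drop (i+1) := by
        rw [List.drop_eq_getElem_cons hlt, hge]
      by_cases hd : PySem.Chars.isdigit c2 = true
      · rw [if_pos hd, (ih _ (by omega)).1 (i+1) _ rfl, hdrop, pnsAfterSharp, if_pos hd,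
          pns_digit_toStr hd, List.append_assoc, List.singleton_append]
      · rw [if_neg hd, hloop i _ hn, hdrop, pnsAfterSharp, if_neg hd, List.append_assoc,
          List.singleton_append, ← hdrop]
    next heq =>
      have hnil : bl.drop i = [] := List.drop_eq_nil_of_le (List.getElem?_eq_none_iff.mp heq)
      rw [hloop i _ hn, hnil, pnsAfterSharp]
      have e0 : pnsScan d ([] : List Char) = [] := by rw [pnsScan]
      rw [e0, List.append_nil]

theorem pnsLoop_eq_scan (bl : List Char) (d : Int) :
    ∀ (i : Nat) (acc : List String), pnsLoop bl d i acc = acc ++ pnsScan d (bl.drop i) := by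
  intro i acc
  exact (pns_loop_octave bl d (bl.length - i)).1 i acc rfl

theorem pnsAlt_eq_scan (d : Int) :
    ∀ (l : List Char) (notes : List String) (cs : Bool),
      (∀ p,
        (match (l.foldl (pnsAltStep d) (notes, some p, true)).2.1 with
          | some q => (l.foldl (pnsAltStep d) (notes, some p, true)).1 ++ [q ++ PySem.Int.toStr d]
          | none => (l.foldl (pnsAltStep d) (notes, some p, true)).1)
          = notes ++ pnsAfterNote d p l) ∧
      (∀ p,
        (match (l.foldl (pnsAltStep d) (notes, some p, false)).2.1 with
          | some q => (l.foldl (pnsAltStep d) (notes, some p, false)).1 ++ [q ++ PySem.Int.toStr d]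
          | none => (l.foldl (pnsAltStep d) (notes, some p, false)).1)
          = notes ++ pnsAfterSharp d p l) ∧
      ((match (l.foldl (pnsAltStep d) (notes, none, cs)).2.1 with
          | some q => (l.foldl (pnsAltStep d) (notes, none, cs)).1 ++ [q ++ PySem.Int.toStr d]
          | none => (l.foldl (pnsAltStep d) (notes, none, cs)).1)
          = notes ++ pnsScan d l) := by
  intro l
  induction l with
  | nil =>
    intro notes cs
    refine ⟨fun p => ?_, fun p => ?_, ?_⟩
    · have eN : pnsAfterNote d p [] = [p ++ PySem.Int.toStr d] := by rw [pnsAfterNote]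
      rw [eN]; rfl
    · have eS : pnsAfterSharp d p [] = [p ++ PySem.Int.toStr d] := by rw [pnsAfterSharp]
      rw [eS]; rfl
    · have e0 : pnsScan d ([] : List Char) = [] := by rw [pnsScan]
      rw [e0, List.append_nil]; rfl
  | cons ch r ihr =>
    intro notes cs
    refine ⟨fun p => ?_, fun p => ?_, ?_⟩
    · -- pending p, a '#' may still attach
      by_cases hch : ch = '#'
      · subst hch
        have estep : pnsAltStep d (notes, some p, true) '#' = (notes, some (p ++ "#"), false) := by
          simp [pnsAltStep]
        rw [List.foldl_cons, estep, (ihr notes false).2.1 (p ++ "#"),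
          pnsAfterNote, if_pos rfl]
      · by_cases hdg : PySem.Chars.isdigit ch = true
        · have estep : pnsAltStep d (notes, some p, true) ch
              = (notes ++ [p ++ String.ofList [ch]], none, true) := by
            simp [pnsAltStep, hch, hdg]
          rw [List.foldl_cons, estep, (ihr _ true).2.2, pnsAfterNote, if_neg hch, if_pos hdg,
            List.append_assoc, List.singleton_append]
        · by_cases hnote : 'a' ≤ PySem.Chars.lowerChar ch ∧ PySem.Chars.lowerChar ch ≤ 'g'
          · have estep : pnsAltStep d (notes, some p, true) ch
                = (notes ++ [p ++ PySem.Int.toStr d],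
                   some (String.ofList [PySem.Chars.upperChar ch]), true) := by
              simp [pnsAltStep, hch, hdg, hnote]
            rw [List.foldl_cons, estep,
              (ihr (notes ++ [p ++ PySem.Int.toStr d]) true).1
                (String.ofList [PySem.Chars.upperChar ch]),
              pnsAfterNote, if_neg hch, if_neg hdg, pnsScan, if_pos hnote,
              List.append_assoc, List.singleton_append]
          · have estep : pnsAltStep d (notes, some p, true) ch
                = (notes ++ [p ++ PySem.Int.toStr d], none, true) := by
              simp [pnsAltStep, hch, hdg, hnote]
            rw [List.foldl_cons, estep, (ihr _ true).2.2, pnsAfterNote, if_neg hch, if_neg hdg,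
              pnsScan_not_note hnote, List.append_assoc, List.singleton_append]
    · -- pending p, '#' can no longer attach
      by_cases hdg : PySem.Chars.isdigit ch = true
      · have estep : pnsAltStep d (notes, some p, false) ch
            = (notes ++ [p ++ String.ofList [ch]], none, false) := by
          simp [pnsAltStep, hdg]
        rw [List.foldl_cons, estep, (ihr _ false).2.2, pnsAfterSharp, if_pos hdg,
          List.append_assoc, List.singleton_append]
      · by_cases hnote : 'a' ≤ PySem.Chars.lowerChar ch ∧ PySem.Chars.lowerChar ch ≤ 'g'
        · have estep : pnsAltStep d (notes, some p, false) ch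
              = (notes ++ [p ++ PySem.Int.toStr d],
                 some (String.ofList [PySem.Chars.upperChar ch]), true) := by
            simp [pnsAltStep, hdg, hnote]
          rw [List.foldl_cons, estep,
            (ihr (notes ++ [p ++ PySem.Int.toStr d]) true).1
              (String.ofList [PySem.Chars.upperChar ch]),
            pnsAfterSharp, if_neg hdg, pnsScan, if_pos hnote,
            List.append_assoc, List.singleton_append]
        · have estep : pnsAltStep d (notes, some p, false) ch
              = (notes ++ [p ++ PySem.Int.toStr d], none, false) := by
            simp [pnsAltStep, hdg, hnote]
          rw [List.foldl_cons, estep, (ihr _ false).2.2, pnsAfterSharp, if_neg hdg,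
            pnsScan_not_note hnote, List.append_assoc, List.singleton_append]
    · -- nothing pending
      by_cases hnote : 'a' ≤ PySem.Chars.lowerChar ch ∧ PySem.Chars.lowerChar ch ≤ 'g'
      · have estep : pnsAltStep d (notes, none, cs) ch
            = (notes, some (String.ofList [PySem.Chars.upperChar ch]), true) := by
          simp [pnsAltStep, hnote]
        rw [List.foldl_cons, estep,
          (ihr notes true).1 (String.ofList [PySem.Chars.upperChar ch]),
          pnsScan, if_pos hnote]
      · have estep : pnsAltStep d (notes, none, cs) ch = (notes, none, cs) := by
          simp [pnsAltStep, hnote]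
        rw [List.foldl_cons, estep, (ihr notes cs).2.2, pnsScan_not_note hnote]

-- ===== VERDICT (by name: the statement is the Claim_ definition above) =====
theorem parse_note_string_spec : Claim_equal_parse_note_string := by
  intro s d _
  unfold Spec_parse_note_string parse_note_string
  have hfold : ∀ (blocks : List String) (acc : List String),
      blocks.foldl (fun acc block => pnsLoop block.toList d 0 acc) acc
        = acc ++ (blocks.map String.toList).flatMap (pnsScan d) := by
    intro blocks
    induction blocks with
    | nil => intro acc; simp
    | cons b bs ih =>
      intro acc
      rw [List.foldl_cons, ih, pnsLoop_eq_scan, List.drop_zero, List.map_cons,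
        List.flatMap_cons, List.append_assoc]
  rw [hfold, List.nil_append]
  have hblocks : (PySem.Str.split₀ (PySem.Str.strip s)).map String.toList
      = PySem.Chars.split₀ (PySem.Chars.strip s.toList) := by
    rw [PySem.Str.split₀_map_toList, PySem.Str.toList_strip]
  rw [hblocks, pns_split_flatMap, pnsScan_strip]
  have halt : parse_note_string_alt s d = pnsScan d s.toList := by
    have h := (pnsAlt_eq_scan d s.toList [] false).2.2
    rw [List.nil_append] at h
    exact h
  rw [halt]
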